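-- pv_equiv track=rewrite | github.com/3774257/python_learning | leetcode/342. Power of Four.py | isPowerOfFour2
-- ===== SOURCE A (Python) =====
-- def isPowerOfFour2(num):
--     if num <= 0:
--         return False
--     while num > 1:
--         if num & 0x03:
--             return False
--         num >>= 2
--     return True
-- ===== SOURCE B (Python) =====
-- def isPowerOfFour2(num):
--     if num <= 0:
--         return False
--     return 4 ** ((num.bit_length() - 1) // 2) == num
-- ===== Notes on version B (the rewrite author's own statement) =====
-- stated objective: simpler
-- what changed: Replaces the shift-by-two loop with a loop-free closed form: derive the candidate exponent from bit_length and test whether four raised to it equals num, once.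
import Mathlib
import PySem

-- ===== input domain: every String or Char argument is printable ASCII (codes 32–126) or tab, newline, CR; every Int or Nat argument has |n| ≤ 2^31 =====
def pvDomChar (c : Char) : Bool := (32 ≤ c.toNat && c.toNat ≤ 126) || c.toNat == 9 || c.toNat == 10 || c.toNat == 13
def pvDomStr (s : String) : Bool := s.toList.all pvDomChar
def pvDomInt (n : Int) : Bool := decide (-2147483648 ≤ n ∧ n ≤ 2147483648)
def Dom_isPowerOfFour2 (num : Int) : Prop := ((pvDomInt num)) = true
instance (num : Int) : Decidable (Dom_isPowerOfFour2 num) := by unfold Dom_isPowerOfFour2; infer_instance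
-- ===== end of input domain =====

-- B replaces A's shift-by-two loop with a loop-free check: derive the candidate
-- exponent from the bit length and test 4^k == num once.

-- ===== PORT A =====
-- the while-loop of A on the (positive) value, as structural recursion
def powLoopA (n : Nat) : Bool :=
  if 1 < n then
    if n &&& 3 ≠ 0 then false
    else powLoopA (n >>> 2)
  else true
termination_by n
decreasing_by
  simp only [Nat.shiftRight_eq_div_pow]
  exact Nat.div_lt_self (by omega) (by omega)

def isPowerOfFour2 (num : Int) : Bool :=
  if num ≤ 0 then false else powLoopA num.toNat

-- ===== PORT B =====
-- num.bit_length() for num > 0 is Nat.log2 num + 1 (exact on positive ints)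
def isPowerOfFour2_alt (num : Int) : Bool :=
  if num ≤ 0 then false
  else (4 : Int) ^ ((num.toNat.log2 + 1 - 1) / 2) == num

-- ===== PRECONDITION & SPEC =====
def Spec_isPowerOfFour2 (num : Int) (out : Bool) : Prop := out = isPowerOfFour2_alt num
instance (num : Int) (out : Bool) : Decidable (Spec_isPowerOfFour2 num out) := by unfold Spec_isPowerOfFour2; infer_instance

-- ===== CLAIM (what is proved, stated in full; the proofs are below) =====
def Claim_equal_isPowerOfFour2 : Prop := ∀ (num : Int), Dom_isPowerOfFour2 num → Spec_isPowerOfFour2 num (isPowerOfFour2 num)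

-- ===== LEMMAS AND PROOFS =====

theorem and_three_eq_mod (n : Nat) : n &&& 3 = n % 4 := by
  have h := Nat.and_two_pow_sub_one_eq_mod n 2
  norm_num at h
  exact h

theorem loopA_iff : ∀ n : Nat, 1 ≤ n → (powLoopA n = true ↔ ∃ k, n = 4 ^ k) := by
  intro n
  induction n using Nat.strong_induction_on with
  | _ n ih =>
    intro hn
    rw [powLoopA]
    by_cases h1 : 1 < n
    · simp only [if_pos h1]
      by_cases h3 : n &&& 3 ≠ 0
      · simp only [if_pos h3]
        constructor
        · intro h; cases h
        · rintro ⟨k, rfl⟩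
          exfalso
          rcases k with _ | k
          · simp at h1
          · have hm : 4 ^ (k + 1) % 4 = 0 := by
              have : 4 ^ (k + 1) = 4 * 4 ^ k := by ring
              omega
            rw [and_three_eq_mod] at h3
            omega
      · push Not at h3
        simp only [h3, ne_eq, not_true_eq_false, if_false]
        rw [and_three_eq_mod] at h3
        have hsr : n >>> 2 = n / 4 := by
          simp [Nat.shiftRight_eq_div_pow]
        have hlt : n / 4 < n := Nat.div_lt_self (by omega) (by omega)
        have hge : 1 ≤ n / 4 := by omega
        rw [hsr, ih (n / 4) hlt hge]
        constructor
        · rintro ⟨k, hk⟩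
          refine ⟨k + 1, ?_⟩
          have : n = 4 * (n / 4) := by omega
          rw [this, hk]; ring
        · rintro ⟨k, rfl⟩
          rcases k with _ | k
          · simp at h1
          · refine ⟨k, ?_⟩
            have : 4 ^ (k + 1) = 4 * 4 ^ k := by ring
            omega
    · simp only [if_neg h1]
      have hone : n = 1 := by omega
      subst hone
      exact iff_of_true trivial ⟨0, rfl⟩

theorem log2_four_pow (k : Nat) : Nat.log2 (4 ^ k) = 2 * k := by
  have h : (4 : Nat) ^ k = 2 ^ (2 * k) := by
    rw [pow_mul]; norm_num
  rw [h, Nat.log2_eq_log_two, Nat.log_pow (by omega)]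

theorem alt_iff (n : Nat) (hn : 1 ≤ n) :
    ((4 : Nat) ^ ((n.log2 + 1 - 1) / 2) = n) ↔ ∃ k, n = 4 ^ k := by
  constructor
  · intro h; exact ⟨_, h.symm⟩
  · rintro ⟨k, rfl⟩
    rw [log2_four_pow]
    norm_num

-- ===== VERDICT (by name: the statement is the Claim_ definition above) =====
theorem isPowerOfFour2_spec : Claim_equal_isPowerOfFour2 := by
  intro num _
  unfold Spec_isPowerOfFour2 isPowerOfFour2 isPowerOfFour2_alt
  by_cases hle : num ≤ 0
  · simp [hle]
  · simp only [if_neg hle]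
    have hpos : 0 < num := by omega
    have h1 : 1 ≤ num.toNat := by omega
    rw [Bool.eq_iff_iff, loopA_iff _ h1, beq_iff_eq]
    rw [← alt_iff _ h1]
    have h' : ((num.toNat : Int)) = num := Int.toNat_of_nonneg (by omega)
    constructor
    · intro h
      have hc : (((4 : Nat) ^ ((num.toNat.log2 + 1 - 1) / 2) : Nat) : Int) = num := by
        rw [h]; exact h'
      exact_mod_cast hc
    · intro h
      rw [← h'] at h
      exact_mod_cast h
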